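-- pv_equiv track=rewrite | github.com/lunalovecode/misc-problems | pak_ganern.py | pak_ganern
-- ===== SOURCE A (Python) =====
-- def pak_ganern(n):
--     sequence = []
--     for i in range(n):
--         for _ in range(i):
--             if len(sequence) >= n:
--                 return sequence
--             sequence.append("PAK")
--         for _ in range(i):
--             if len(sequence) >= n:
--                 return sequence
--             sequence.append("GANERN")
--     return sequence
-- ===== SOURCE B (Python) =====
-- def pak_ganern(n):
--     def _isqrt(x):
--         if x < 2:
--             return x
--         r = x
--         s = (r + x // r) // 2
--         while s < r:
--             r, s = s, (s + x // s) // 2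
--         return r
--
--     def word(k):
--         i = (1 + _isqrt(4 * k + 1)) // 2
--         return "PAK" if k - i * (i - 1) < i else "GANERN"
--
--     return [word(k) for k in range(n)]
-- ===== Notes on version B (the rewrite author's own statement) =====
-- stated objective: alternative
-- what changed: B computes each position independently by a closed-form index formula: the block index i containing position k is recovered arithmetically via an integer square root (Newton iteration), so no sequence is built incrementally and no per-append length guard or early return exists.
-- intended difference: For n = 1 A returns [] because its outer loop range(n) only reaches i = 0 and never appends, while B returns ['PAK'], the length-1 prefix of the PAK/GANERN sequence, which is the intended length-n output. — e.g. on pak_ganern(1): A returns [], B returns ["PAK"]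
import Mathlib
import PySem

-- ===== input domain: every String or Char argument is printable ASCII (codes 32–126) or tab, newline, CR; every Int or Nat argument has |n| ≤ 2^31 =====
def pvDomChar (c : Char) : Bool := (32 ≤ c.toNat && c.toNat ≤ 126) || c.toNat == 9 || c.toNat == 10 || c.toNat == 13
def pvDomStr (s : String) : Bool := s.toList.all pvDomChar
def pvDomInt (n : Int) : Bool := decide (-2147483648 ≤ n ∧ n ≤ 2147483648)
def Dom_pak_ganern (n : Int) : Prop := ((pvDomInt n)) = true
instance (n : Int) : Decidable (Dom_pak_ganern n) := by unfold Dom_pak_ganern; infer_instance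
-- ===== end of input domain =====

-- B computes each position independently via a closed-form block-index formula (integer
-- square root by Newton iteration) instead of A's incremental appends with per-element
-- length guards (objective: alternative); for n = 1 A returns [] while B returns ["PAK"],
-- the intended length-1 value.

-- ===== PORT A =====
-- inner 'for _ in range(k): if len(seq) >= n: return seq; seq.append(word)';
-- the Bool records whether the early 'return' fired
def pvAppendLoop (word : String) (n : Int) : Nat → List String → List String × Bool
  | 0, seq => (seq, false)
  | k+1, seq =>
      if (seq.length : Int) ≥ n then (seq, true)
      else pvAppendLoop word n k (seq ++ [word])

-- outer 'for i in range(n)', propagating the early return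
def pvOuterA (n : Int) : List Int → List String → List String
  | [], seq => seq
  | i :: rest, seq =>
      match pvAppendLoop "PAK" n i.toNat seq with
      | (s1, true) => s1
      | (s1, false) =>
          match pvAppendLoop "GANERN" n i.toNat s1 with
          | (s2, true) => s2
          | (s2, false) => pvOuterA n rest s2

def pak_ganern (n : Int) : List String :=
  pvOuterA n (PySem.List.pyRange 0 n 1) []

-- ===== PORT B =====
-- 'r = x; s = (r + x//r)//2; while s < r: r, s = s, (s + x//s)//2; return r'
def pvNewton (x : Nat) (r : Nat) : Nat :=
  let s := (r + x / r) / 2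
  if _h : s < r then pvNewton x s else r
termination_by r

-- '_isqrt(x)'
def pvIsqrtB (x : Nat) : Nat := if x < 2 then x else pvNewton x x

-- 'word(k)'
def pvWordB (k : Nat) : String :=
  let i := (1 + pvIsqrtB (4 * k + 1)) / 2
  if k - i * (i - 1) < i then "PAK" else "GANERN"

-- '[word(k) for k in range(n)]' (k in range(n) is nonnegative, so .toNat is exact)
def pak_ganern_alt (n : Int) : List String :=
  (PySem.List.pyRange 0 n 1).map (fun k => pvWordB k.toNat)

-- ===== PRECONDITION & SPEC =====
-- For n = 1 A returns [] (its outer loop range(n) stops before block 1 ever appends),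
-- while B returns ["PAK"], the length-1 prefix of the PAK/GANERN sequence — the intended value.
def D_pak_ganern (n : Int) : Prop := n = 1
instance (n : Int) : Decidable (D_pak_ganern n) := by unfold D_pak_ganern; infer_instance

def Spec_pak_ganern (n : Int) (out : List String) : Prop := ¬ D_pak_ganern n → out = pak_ganern_alt n
instance (n : Int) (out : List String) : Decidable (Spec_pak_ganern n out) := by unfold Spec_pak_ganern; infer_instance

def pvDiffWitness_pak_ganern : Int := 1
def pvDiffWitnessOut_pak_ganern : (List String) × (List String) := ([], ["PAK"])

-- ===== CLAIM (what is proved, stated in full; the proofs are below) =====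
def Claim_unchanged_pak_ganern : Prop := ∀ (n : Int), Dom_pak_ganern n → Spec_pak_ganern n (pak_ganern n)
def Claim_changed_pak_ganern : Prop := Dom_pak_ganern (pvDiffWitness_pak_ganern) ∧ D_pak_ganern (pvDiffWitness_pak_ganern) ∧ pak_ganern (pvDiffWitness_pak_ganern) = pvDiffWitnessOut_pak_ganern.1 ∧ pak_ganern_alt (pvDiffWitness_pak_ganern) = pvDiffWitnessOut_pak_ganern.2 ∧ pvDiffWitnessOut_pak_ganern.1 ≠ pvDiffWitnessOut_pak_ganern.2
def Claim_exact_pak_ganern : Prop := ∀ (n : Int), Dom_pak_ganern n → D_pak_ganern n → pak_ganern n ≠ pak_ganern_alt n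

-- ===== LEMMAS AND PROOFS =====

-- the full block sequence of the first m blocks (the initial block is empty)
def pvF : Nat → List String
  | 0 => []
  | m+1 => pvF m ++ (List.replicate m "PAK" ++ List.replicate m "GANERN")

lemma pvF_len : ∀ m, (pvF m).length = m * (m - 1) := by
  intro m
  induction m with
  | zero => rfl
  | succ k ih =>
      simp only [pvF, List.length_append, List.length_replicate, ih, Nat.add_sub_cancel]
      cases k with
      | zero => rfl
      | succ j => simp; ring

lemma pvF_prefix {a b : Nat} (h : a ≤ b) : pvF a <+: pvF b := by
  induction b with
  | zero => simp_all
  | succ k ih =>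
      rcases Nat.lt_or_ge a (k+1) with h' | h'
      · exact (ih (by omega)).trans (List.prefix_append _ _)
      · have : a = k + 1 := by omega
        subst this; exact List.prefix_refl _

lemma repl_prefix (w : String) {a b : Nat} (h : a ≤ b) :
    List.replicate a w <+: List.replicate b w :=
  ⟨List.replicate (b - a) w, by rw [← List.replicate_add]; congr 1; omega⟩

lemma prefix_take_eq {l₁ l₂ : List String} (h : l₁ <+: l₂) : l₂.take l₁.length = l₁ := by
  obtain ⟨t, rfl⟩ := h
  simp

lemma F_big {t : Nat} (h : 2 ≤ t) : t ≤ (pvF t).length := by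
  rw [pvF_len]
  calc t = t * 1 := (Nat.mul_one t).symm
    _ ≤ t * (t - 1) := Nat.mul_le_mul_left t (by omega)

-- characterisation of the inner loop: completes when it fits, truncates at length n otherwise
lemma appendLoop_full (w : String) (n : Int) :
    ∀ (k : Nat) (seq : List String), (seq.length : Int) + k ≤ n →
      pvAppendLoop w n k seq = (seq ++ List.replicate k w, false) := by
  intro k
  induction k with
  | zero => intro seq _; simp [pvAppendLoop]
  | succ j ih =>
      intro seq h
      have hlt : ¬ ((seq.length : Int) ≥ n) := by push_cast at h ⊢; omega
      simp only [pvAppendLoop, if_neg hlt]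
      rw [ih (seq ++ [w]) (by simp; push_cast at h ⊢; omega)]
      simp [List.replicate_succ, List.append_assoc]

lemma appendLoop_trunc (w : String) (n : Int) :
    ∀ (k : Nat) (seq : List String), (seq.length : Int) ≤ n → n < (seq.length : Int) + k →
      pvAppendLoop w n k seq = (seq ++ List.replicate (n - seq.length).toNat w, true) := by
  intro k
  induction k with
  | zero => intro seq h1 h2; omega
  | succ j ih =>
      intro seq h1 h2
      by_cases hge : (seq.length : Int) ≥ n
      · have : (n - (seq.length : Int)).toNat = 0 := by omega
        simp [pvAppendLoop, if_pos hge, this]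
      · simp only [pvAppendLoop, if_neg hge]
        rw [ih (seq ++ [w]) (by simp; omega) (by simp; push_cast at h2 ⊢; omega)]
        have h1' : (n - ((seq ++ [w]).length : Int)).toNat + 1 = (n - seq.length).toNat := by
          simp; omega
        rw [← h1', List.replicate_succ, List.append_assoc]
        rfl

-- final step of every truncating branch: a length-n prefix of the block sequence
lemma pvFinish (n : Int) (s : List String) (m : Nat) (hm : m ≤ n.toNat)
    (hpre : s <+: pvF m) (hlen : s.length = n.toNat) :
    s = (pvF n.toNat).take n.toNat := by
  have h2 := hpre.trans (pvF_prefix hm)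
  calc s = (pvF n.toNat).take s.length := (prefix_take_eq h2).symm
    _ = (pvF n.toNat).take n.toNat := by rw [hlen]

-- invariant for A's outer loop
lemma outer_inv (n : Int) (hn : 2 ≤ n) :
    ∀ (fuel i : Nat), n.toNat - i ≤ fuel → (i : Int) ≤ n → ((pvF i).length : Int) ≤ n →
      pvOuterA n (PySem.List.pyRange (i : Int) n 1) (pvF i) = (pvF n.toNat).take n.toNat := by
  intro fuel
  induction fuel with
  | zero =>
      intro i hf hi hL
      have : (i : Int) = n := by omega
      rw [PySem.List.pyRange_one_eq_nil (le_of_eq this.symm)]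
      have hiN : i = n.toNat := by omega
      subst hiN
      have h1 : n.toNat ≤ (pvF n.toNat).length := F_big (by omega)
      rw [List.take_of_length_le (by omega)]
      rfl
  | succ fuel ih =>
      intro i hf hi hL
      by_cases hlt : (i : Int) < n
      case neg =>
        have : (i : Int) = n := by omega
        rw [PySem.List.pyRange_one_eq_nil (le_of_eq this.symm)]
        have hiN : i = n.toNat := by omega
        subst hiN
        have h1 : n.toNat ≤ (pvF n.toNat).length := F_big (by omega)
        rw [List.take_of_length_le (by omega)]
        rfl
      case pos =>
      rw [PySem.List.pyRange_one_cons hlt]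
      have htn : (i : Int).toNat = i := Int.toNat_natCast i
      by_cases hfull1 : ((pvF i).length : Int) + i ≤ n
      · -- first inner loop completes
        simp only [pvOuterA, htn, appendLoop_full "PAK" n i (pvF i) hfull1]
        have hlen1 : ((pvF i ++ List.replicate i "PAK").length : Int) = (pvF i).length + i := by
          simp
        by_cases hfull2 : ((pvF i).length : Int) + i + i ≤ n
        · -- second inner loop completes too : one full block added, recurse
          rw [appendLoop_full "GANERN" n i _ (by rw [hlen1]; omega)]
          have hF : pvF i ++ List.replicate i "PAK" ++ List.replicate i "GANERN" = pvF (i+1) := by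
            simp [pvF, List.append_assoc]
          simp only [List.append_assoc] at hF ⊢
          rw [hF]
          have hpush : ((i : Int) + 1) = ((i + 1 : Nat) : Int) := by push_cast; ring
          rw [hpush]
          apply ih (i+1) (by omega) (by push_cast; omega)
          have hstep : (pvF (i+1)).length = (pvF i).length + (i + i) := by
            simp [pvF]
          push_cast [hstep]; push_cast at hfull2; omega
        · -- second inner loop truncates at length n
          rw [appendLoop_trunc "GANERN" n i _ (by rw [hlen1]; omega) (by rw [hlen1]; omega)]
          apply pvFinish n _ (i+1) (by omega)
          · have hF1 : pvF (i+1) = (pvF i ++ List.replicate i "PAK") ++ List.replicate i "GANERN" := by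
              simp [pvF, List.append_assoc]
            rw [hF1]
            exact (List.prefix_append_right_inj (pvF i ++ List.replicate i "PAK")).mpr
              (repl_prefix "GANERN" (by rw [hlen1]; omega))
          · simp only [List.length_append, List.length_replicate]
            push_cast at hlen1 ⊢; omega
      · -- first inner loop truncates at length n
        simp only [pvOuterA, htn,
          appendLoop_trunc "PAK" n i (pvF i) hL (by omega)]
        apply pvFinish n _ (i+1) (by omega)
        · have hF1 : pvF (i+1) = pvF i ++ (List.replicate i "PAK" ++ List.replicate i "GANERN") := by
            simp [pvF]
          rw [hF1]
          exact (List.prefix_append_right_inj (pvF i)).mpr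
            ((repl_prefix "PAK" (show (n - ((pvF i).length:Int)).toNat ≤ i by omega)).trans
              (List.prefix_append _ _))
        · simp only [List.length_append, List.length_replicate]; omega

-- Newton iteration computes Nat.sqrt (given the invariant sqrt x ≤ r and sqrt x ≥ 1)
lemma pvNewton_eq (x : Nat) : ∀ r, 1 ≤ Nat.sqrt x → Nat.sqrt x ≤ r → pvNewton x r = Nat.sqrt x := by
  intro r
  induction r using Nat.strong_induction_on with
  | _ r ih =>
      intro h1 h2
      have hr : 1 ≤ r := le_trans h1 h2
      rw [pvNewton]
      set q := Nat.sqrt x with hqdef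
      have hq : q * q ≤ x := by nlinarith [Nat.sqrt_le' x]
      -- s ≥ q : AM-GM in Nat
      have hdiv : q * q / r ≤ x / r := Nat.div_le_div_right hq
      have hstep : 2 * q - r ≤ q * q / r := by
        rw [Nat.le_div_iff_mul_le (by omega)]
        rcases Nat.le_total (2 * q) r with hc | hc
        · have h0 : 2 * q - r = 0 := by omega
          simp [h0]
        · zify [hc]
          nlinarith [sq_nonneg ((q : Int) - r)]
      have hs : q ≤ (r + x / r) / 2 := by omega
      split_ifs with hlt
      · exact ih _ hlt h1 hs
      · -- terminated: r ≤ (r + x/r)/2 so x/r ≥ r so r*r ≤ x so r ≤ q; with h2, r = q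
        have h3 : r ≤ x / r := by omega
        have h4 : r * r ≤ x := (Nat.le_div_iff_mul_le (by omega)).mp h3
        have h5 : r ≤ q := Nat.le_sqrt'.mpr (by nlinarith)
        omega

lemma pvIsqrtB_eq (x : Nat) : pvIsqrtB x = Nat.sqrt x := by
  unfold pvIsqrtB
  split_ifs with h
  · interval_cases x <;> rfl
  · exact pvNewton_eq x x (Nat.le_sqrt'.mpr (by nlinarith)) (Nat.sqrt_le_self x)

-- the block index as computed by B, and its bracketing property
def pvBlk (k : Nat) : Nat := (1 + Nat.sqrt (4 * k + 1)) / 2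

lemma pvBlk_bracket (k : Nat) :
    1 ≤ pvBlk k ∧ pvBlk k * (pvBlk k - 1) ≤ k ∧ k < pvBlk k * (pvBlk k + 1) := by
  simp only [pvBlk]
  have hle := Nat.sqrt_le' (4 * k + 1)
  have hlt := Nat.lt_succ_sqrt' (4 * k + 1)
  simp only [Nat.succ_eq_add_one] at hlt
  set s := Nat.sqrt (4 * k + 1) with hs
  have hs1 : 1 ≤ s := by nlinarith
  set i := (1 + s) / 2 with hi
  have hib : 2 * i ≤ 1 + s ∧ s ≤ 2 * i := by omega
  have hi1 : 1 ≤ i := by omega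
  refine ⟨hi1, ?_, ?_⟩
  · -- (2i-1)^2 ≤ s^2 ≤ 4k+1  ⇒  i*(i-1) ≤ k
    obtain ⟨j, hj⟩ : ∃ j, i = j + 1 := ⟨i - 1, by omega⟩
    have hjs : 2 * j + 1 ≤ s := by omega
    have hmul := Nat.mul_le_mul hjs hjs
    have hexp : i * (i - 1) = (j + 1) * j := by rw [hj]; simp
    rw [hexp]
    nlinarith
  · -- 4k+1 < (s+1)^2 ≤ (2i+1)^2  ⇒  k < i*(i+1)
    have hsi : s + 1 ≤ 2 * i + 1 := by omega
    have hmul := Nat.mul_le_mul hsi hsi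
    nlinarith

-- pvWordB k, rewritten through the sqrt characterisation
lemma pvWordB_eq (k : Nat) :
    pvWordB k = if k - pvBlk k * (pvBlk k - 1) < pvBlk k then "PAK" else "GANERN" := by
  unfold pvWordB pvBlk
  rw [pvIsqrtB_eq]

-- uniqueness of the bracketing block index
lemma pvBlk_unique (k m : Nat) (hm1 : 1 ≤ m)
    (hlo : m * (m - 1) ≤ k) (hhi : k < m * (m + 1)) : pvBlk k = m := by
  obtain ⟨hi1, hilo, hihi⟩ := pvBlk_bracket k
  set i := pvBlk k
  rcases lt_trichotomy i m with h | h | h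
  · exfalso
    have h1 : i * (i + 1) ≤ (m - 1) * m := Nat.mul_le_mul (by omega) (by omega)
    have h2 : (m - 1) * m = m * (m - 1) := Nat.mul_comm _ _
    omega
  · exact h
  · exfalso
    have h1 : m * (m + 1) ≤ (i - 1) * i := Nat.mul_le_mul (by omega) (by omega)
    have h2 : (i - 1) * i = i * (i - 1) := Nat.mul_comm _ _
    omega

-- every element of the block sequence is what B's closed form says
lemma pvF_get : ∀ (m k : Nat) (h : k < (pvF m).length), (pvF m)[k] = pvWordB k := by
  intro m
  induction m with
  | zero => intro k h; simp [pvF] at h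
  | succ m ih =>
      intro k h
      have hsplit : pvF (m+1) = pvF m ++ (List.replicate m "PAK" ++ List.replicate m "GANERN") := rfl
      by_cases hk : k < (pvF m).length
      · simp only [hsplit]
        rw [List.getElem_append_left hk]
        exact ih k hk
      · have hm1 : 1 ≤ m := by
          by_contra h0
          have hm0 : m = 0 := by omega
          subst hm0
          have hz : (pvF (0+1)).length = 0 := rfl
          omega
        have hlm : (pvF m).length = m * (m - 1) := pvF_len m
        have hlen : (pvF (m+1)).length = m * (m - 1) + (m + m) := by
          simp [pvF, hlm]
        have hbound : k < m * (m - 1) + (m + m) := by omega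
        have hblk : pvBlk k = m := by
          apply pvBlk_unique k m hm1 (by omega)
          have : m * (m + 1) = m * (m - 1) + (m + m) := by
            cases m with
            | zero => omega
            | succ j =>
                have hsub : j + 1 - 1 = j := rfl
                rw [hsub]; ring
          omega
        rw [pvWordB_eq, hblk]
        simp only [hsplit]
        rw [List.getElem_append_right (by omega)]
        by_cases ho : k - (pvF m).length < m
        · rw [List.getElem_append_left (by simpa using ho), List.getElem_replicate]
          rw [if_pos (by omega)]
        · rw [List.getElem_append_right (by simpa using ho), List.getElem_replicate]
          rw [if_neg (by omega)]

-- B as a map over List.range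
lemma altB_eq (n : Int) :
    pak_ganern_alt n = (List.range n.toNat).map pvWordB := by
  unfold pak_ganern_alt
  rw [PySem.List.pyRange_one]
  simp [List.map_map, Function.comp_def]

-- main equivalence outside D_
lemma unchanged (n : Int) (hD : n ≠ 1) : pak_ganern n = pak_ganern_alt n := by
  by_cases hle : n ≤ 0
  · -- n ≤ 0 : both are []
    have hA : pak_ganern n = [] := by
      unfold pak_ganern
      rw [PySem.List.pyRange_one_eq_nil hle]
      rfl
    rw [hA, altB_eq]
    have : n.toNat = 0 := by omega
    rw [this]; rfl
  · have hn : 2 ≤ n := by omega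
    have hA : pak_ganern n = (pvF n.toNat).take n.toNat := by
      unfold pak_ganern
      have := outer_inv n hn n.toNat 0 (by omega) (by omega) (by simp [pvF]; omega)
      simpa [pvF] using this
    have hbig : n.toNat ≤ (pvF n.toNat).length := F_big (by omega)
    rw [hA, altB_eq]
    apply List.ext_getElem
    · simp [hbig]
    · intro k h1 h2
      simp only [List.length_take] at h1
      rw [List.getElem_take, List.getElem_map, List.getElem_range]
      exact pvF_get n.toNat k (by omega)

-- ===== VERDICT (by name: the statement is the Claim_ definition above) =====
theorem pak_ganern_spec : Claim_unchanged_pak_ganern := by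
  intro n _ hD
  exact unchanged n hD

theorem pak_ganern_changed : Claim_changed_pak_ganern := by
  unfold Claim_changed_pak_ganern; decide

theorem pak_ganern_tight : Claim_exact_pak_ganern := by
  intro n _ hD
  subst hD
  decide
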